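-- pv_equiv track=rewrite | github.com/Giusgarus/skill_up | backend/db/utility.py | check_primary_keys
-- ===== SOURCE A (Python) =====
-- table_primary_keys_dict = {
--     "users": ["user_id", "username", "email"],
--     "tasks": ["task_id", "user_id"],
--     "sessions": ["token"],
--     "leaderboard": ["_id"],
-- }
--
-- def check_primary_keys(table_name: str, record: dict):
--     primary_keys = table_primary_keys_dict[table_name]
--     _ = primary_keys.__len__()
--     for k in primary_keys:
--         if k not in record.keys():
--             _ -= 1
--     if _ == 0:
--         return False
--     return True
-- ===== SOURCE B (Python) =====
-- table_primary_keys_dict = {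
--     "users": ["user_id", "username", "email"],
--     "tasks": ["task_id", "user_id"],
--     "sessions": ["token"],
--     "leaderboard": ["_id"],
-- }
--
-- def check_primary_keys(table_name: str, record: dict):
--     primary_keys = table_primary_keys_dict[table_name]
--     for k in record:
--         if k in primary_keys:
--             return True
--     return False
-- ===== Notes on version B (the rewrite author's own statement) =====
-- stated objective: alternative
-- what changed: Inverts the traversal: instead of A's full pass over the primary-key list maintaining a decrementing counter, B scans the record's keys and returns True on the first one that is a primary key (early exit, no counter, no final comparison).
import Mathlib
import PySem

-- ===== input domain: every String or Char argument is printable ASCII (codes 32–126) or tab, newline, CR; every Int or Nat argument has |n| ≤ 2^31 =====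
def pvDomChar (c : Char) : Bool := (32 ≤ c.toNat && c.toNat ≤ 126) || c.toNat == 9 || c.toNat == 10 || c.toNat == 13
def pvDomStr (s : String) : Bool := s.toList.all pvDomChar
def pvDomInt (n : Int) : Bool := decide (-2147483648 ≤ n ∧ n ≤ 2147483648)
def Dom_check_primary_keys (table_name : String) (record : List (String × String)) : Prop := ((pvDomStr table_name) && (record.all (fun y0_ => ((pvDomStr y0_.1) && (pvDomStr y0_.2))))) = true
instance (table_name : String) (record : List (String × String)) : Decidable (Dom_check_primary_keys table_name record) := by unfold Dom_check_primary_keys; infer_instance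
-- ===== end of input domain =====

-- B inverts the traversal: it scans the record's keys with an early return on the first primary key,
-- instead of A's full counting pass over the primary-key list (alternative decomposition; same result).

-- module-level constant shared by both versions
def table_primary_keys_dict : PySem.Dict String (List String) :=
  PySem.Dict.ofList
    [ ("users", ["user_id", "username", "email"])
    , ("tasks", ["task_id", "user_id"])
    , ("sessions", ["token"])
    , ("leaderboard", ["_id"]) ]

-- ===== PORT A =====
def check_primary_keys (table_name : String) (record : List (String × String)) : Bool :=
  match table_primary_keys_dict.get? table_name with
  | none => false   -- Python raises KeyError here; excluded by Pre_
  | some primary_keys =>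
      let u0 : Int := primary_keys.length
      let u := primary_keys.foldl
        (fun u k => if (PySem.Dict.mk record).contains k then u else u - 1) u0
      if u = 0 then false else true

-- ===== PORT B =====
-- B's loop: 'for k in record: if k in primary_keys: return True' — early-exit recursion over the dict's keys
def scanKeys (primary_keys : List String) : List String → Bool
  | [] => false
  | k :: rest => if primary_keys.contains k then true else scanKeys primary_keys rest

def check_primary_keys_alt (table_name : String) (record : List (String × String)) : Bool :=
  match table_primary_keys_dict.get? table_name with
  | none => false   -- Python raises KeyError here; excluded by Pre_
  | some primary_keys => scanKeys primary_keys ((PySem.Dict.mk record).keys)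

-- ===== PRECONDITION & SPEC =====
-- Pre_ excludes exactly the table names absent from table_primary_keys_dict, on which A raises KeyError.
def Pre_check_primary_keys (table_name : String) (record : List (String × String)) : Prop :=
  table_name = "users" ∨ table_name = "tasks" ∨ table_name = "sessions" ∨ table_name = "leaderboard"
instance (table_name : String) (record : List (String × String)) : Decidable (Pre_check_primary_keys table_name record) := by unfold Pre_check_primary_keys; infer_instance

def pvWitness_check_primary_keys : String × (List (String × String)) := ("users", [("user_id", "7")])

def Spec_check_primary_keys (table_name : String) (record : List (String × String)) (out : Bool) : Prop := out = check_primary_keys_alt table_name record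
instance (table_name : String) (record : List (String × String)) (out : Bool) : Decidable (Spec_check_primary_keys table_name record out) := by unfold Spec_check_primary_keys; infer_instance

-- ===== CLAIM =====
def Claim_equal_check_primary_keys : Prop := ∀ (table_name : String) (record : List (String × String)), Dom_check_primary_keys table_name record → Pre_check_primary_keys table_name record → Spec_check_primary_keys table_name record (check_primary_keys table_name record)

-- ===== LEMMAS AND PROOFS =====

-- A's counter loop computes the start value minus the number of missing primary keys
theorem foldl_dec (record : List (String × String)) (pks : List String) (u : Int) :
    pks.foldl (fun u k => if (PySem.Dict.mk record).contains k then u else u - 1) u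
      = u - (pks.countP (fun k => !(PySem.Dict.mk record).contains k) : Int) := by
  induction pks generalizing u with
  | nil => simp
  | cons k rest ih =>
    simp only [List.foldl_cons, List.countP_cons, ih]
    by_cases h : (PySem.Dict.mk record).contains k = true
    · simp [h]
    · simp [h]; ring

-- B's early-exit scan is true exactly when some scanned key is a primary key
theorem scanKeys_eq_true (pks l : List String) :
    scanKeys pks l = true ↔ ∃ k ∈ l, k ∈ pks := by
  induction l with
  | nil => simp [scanKeys]
  | cons k rest ih =>
    by_cases h : pks.contains k = true
    · simp only [scanKeys, if_pos h]
      simp only [List.contains_eq_mem, decide_eq_true_eq] at h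
      simp [h]
    · simp only [scanKeys, if_neg h, ih]
      simp only [List.contains_eq_mem, decide_eq_true_eq] at h
      simp [h]

-- the two result expressions agree for every primary-key list
theorem ports_agree (pks : List String) (record : List (String × String)) :
    (if (pks.foldl (fun u k => if (PySem.Dict.mk record).contains k then u else u - 1)
        (pks.length : Int)) = 0 then false else true)
      = scanKeys pks ((PySem.Dict.mk record).keys) := by
  rw [foldl_dec]
  have hsub : pks.countP (fun k => !(PySem.Dict.mk record).contains k) ≤ pks.length :=
    List.countP_le_length
  rw [Bool.eq_iff_iff]
  rw [scanKeys_eq_true]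
  constructor
  · intro h
    split_ifs at h with h0
    -- the pos (counter = 0) case is closed by split_ifs itself (h : false = true)
    have hlt : pks.countP (fun k => !(PySem.Dict.mk record).contains k) < pks.length := by
      omega
    obtain ⟨k, hk, hck⟩ : ∃ k ∈ pks, ¬ (!(PySem.Dict.mk record).contains k) = true := by
      by_contra hall
      push Not at hall
      have := List.countP_eq_length.mpr hall
      omega
    refine ⟨k, ?_, hk⟩
    rw [← PySem.Dict.contains_iff_mem_keys]
    simpa using hck
  · rintro ⟨k, hkeys, hk⟩
    have hck : (PySem.Dict.mk record).contains k = true :=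
      (PySem.Dict.contains_iff_mem_keys _ _).mpr hkeys
    have hlt : pks.countP (fun k => !(PySem.Dict.mk record).contains k) < pks.length := by
      apply lt_of_le_of_ne hsub
      intro he
      have := List.countP_eq_length.mp he k hk
      simp [hck] at this
    have h0 : ¬ ((pks.length : Int) - (pks.countP (fun k => !(PySem.Dict.mk record).contains k) : Int) = 0) := by omega
    rw [if_neg h0]

-- ===== VERDICT =====
theorem check_primary_keys_spec : Claim_equal_check_primary_keys := by
  intro tn record _ hpre
  unfold Spec_check_primary_keys check_primary_keys check_primary_keys_alt
  rcases hpre with h | h | h | h <;> subst h <;> exact ports_agree _ record
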